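-- pv_equiv track=rewrite | github.com/WangMinan/chronaris | src/chronaris/models/alignment/losses.py | _select_feature_indices
-- ===== SOURCE A (Python) =====
-- def _select_feature_indices(feature_names: tuple[str, ...], tokens: tuple[str, ...]) -> tuple[int, ...]:
--     normalized_tokens = tuple(token.lower() for token in tokens)
--     selected: list[int] = []
--     for feature_index, feature_name in enumerate(feature_names):
--         normalized_feature = feature_name.lower()
--         if any(token in normalized_feature for token in normalized_tokens):
--             selected.append(feature_index)
--     return tuple(selected)
-- ===== SOURCE B (Python) =====
-- def _select_feature_indices(feature_names: tuple[str, ...], tokens: tuple[str, ...]) -> tuple[int, ...]: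
--     # Token-outer partition refinement: each token splits the pool of still-unmatched
--     # (index, lowered-name) pairs; matched indices leave the pool for good, and the
--     # loop stops early once every feature has matched. Result is the sorted index set.
--     remaining = [(i, name.lower()) for i, name in enumerate(feature_names)]
--     hit: list[int] = []
--     for token in tokens:
--         t = token.lower()
--         nxt = []
--         for i, name in remaining:
--             if t in name:
--                 hit.append(i)
--             else:
--                 nxt.append((i, name))
--         remaining = nxt
--         if not remaining:
--             break
--     return tuple(sorted(hit))
-- ===== Notes on version B (the rewrite author's own statement) =====
-- stated objective: alternative
-- what changed: Feature-outer any() scan replaced by token-outer partition refinement: each name is lowercased once, every token splits the pool of still-unmatched (index, name) pairs, matched indices leave the pool, the loop breaks when the pool empties, and the sorted hit list is returned.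
import Mathlib
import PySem

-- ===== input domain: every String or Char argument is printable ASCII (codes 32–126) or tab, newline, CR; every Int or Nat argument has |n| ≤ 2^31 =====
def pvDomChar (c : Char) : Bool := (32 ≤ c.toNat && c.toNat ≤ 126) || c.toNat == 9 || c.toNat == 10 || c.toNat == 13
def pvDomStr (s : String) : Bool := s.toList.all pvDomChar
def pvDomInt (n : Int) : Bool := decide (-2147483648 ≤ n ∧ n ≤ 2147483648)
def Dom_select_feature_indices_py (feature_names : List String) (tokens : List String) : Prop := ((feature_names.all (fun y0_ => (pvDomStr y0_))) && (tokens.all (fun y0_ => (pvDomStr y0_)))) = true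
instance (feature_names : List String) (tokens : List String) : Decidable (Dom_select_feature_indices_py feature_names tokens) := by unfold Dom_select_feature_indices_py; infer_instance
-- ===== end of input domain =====

-- B replaces the feature-outer any() loop by a token-outer pass over once-lowercased
-- names that unions per-token match sets and returns the sorted index set (alternative).


-- ===== PORT A =====
def select_feature_indices_py (feature_names : List String) (tokens : List String) : List Int :=
  let normalized_tokens := tokens.map PySem.Str.lower
  let selected : List Int :=
    (PySem.List.enumerate feature_names).foldl
      (fun selected p =>
        let normalized_feature := PySem.Str.lower p.2
        if normalized_tokens.any (fun token => PySem.Str.isIn token normalized_feature)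
        then selected ++ [p.1] else selected) []
  selected

-- ===== PORT B =====
-- per-token refinement loop of B: split the pool, stop when it empties
def pvAltLoop (tokens : List String) (hit : List Int) (remaining : List (Int × String)) : List Int :=
  match tokens with
  | [] => hit
  | token :: ts =>
    let t := PySem.Str.lower token
    let st := remaining.foldl
      (fun (acc : List Int × List (Int × String)) p =>
        if PySem.Str.isIn t p.2 then (acc.1 ++ [p.1], acc.2) else (acc.1, acc.2 ++ [p]))
      (hit, [])
    if st.2 = [] then st.1 else pvAltLoop ts st.1 st.2

def select_feature_indices_py_alt (feature_names : List String) (tokens : List String) : List Int :=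
  let remaining := (PySem.List.enumerate feature_names).map (fun p => (p.1, PySem.Str.lower p.2))
  PySem.List.sorted (pvAltLoop tokens [] remaining) (fun x => x) false

-- ===== PRECONDITION & SPEC =====
def Spec_select_feature_indices_py (feature_names : List String) (tokens : List String) (out : List Int) : Prop := out = select_feature_indices_py_alt feature_names tokens
instance (feature_names : List String) (tokens : List String) (out : List Int) : Decidable (Spec_select_feature_indices_py feature_names tokens out) := by unfold Spec_select_feature_indices_py; infer_instance

-- ===== CLAIM (what is proved, stated in full; the proofs are below) =====
def Claim_equal_select_feature_indices_py : Prop := ∀ (feature_names : List String) (tokens : List String), Dom_select_feature_indices_py feature_names tokens → Spec_select_feature_indices_py feature_names tokens (select_feature_indices_py feature_names tokens)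

-- ===== LEMMAS AND PROOFS =====

-- the inner partition pass, as two filters
theorem pv_fold_partition (t : String) (remaining : List (Int × String))
    (h0 : List Int) (n0 : List (Int × String)) :
    remaining.foldl
      (fun (acc : List Int × List (Int × String)) p =>
        if PySem.Str.isIn t p.2 then (acc.1 ++ [p.1], acc.2) else (acc.1, acc.2 ++ [p]))
      (h0, n0) =
    (h0 ++ (remaining.filter (fun p => PySem.Str.isIn t p.2)).map (fun p => p.1),
     n0 ++ remaining.filter (fun p => !PySem.Str.isIn t p.2)) := by
  induction remaining generalizing h0 n0 with
  | nil => simp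
  | cons p ps ih =>
    rw [List.foldl_cons]
    by_cases h : PySem.Chars.isIn t.toList p.2.toList = true
    · rw [if_pos (show PySem.Str.isIn t p.2 = true by simpa using h), ih]
      simp [h]
    · rw [if_neg (show ¬ PySem.Str.isIn t p.2 = true by simpa using h), ih]
      simp [h]

-- what ends up in the loop's hit list
theorem pv_mem_altLoop (toks : List String) (hit : List Int)
    (remaining : List (Int × String)) (x : Int) :
    x ∈ pvAltLoop toks hit remaining ↔
    x ∈ hit ∨ ∃ p ∈ remaining, x = p.1 ∧
      ∃ t ∈ toks, PySem.Str.isIn (PySem.Str.lower t) p.2 := by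
  induction toks generalizing hit remaining with
  | nil => simp [pvAltLoop]
  | cons token ts ih =>
    rw [pvAltLoop]
    simp only [pv_fold_partition]
    by_cases hrem : remaining.filter (fun p => !PySem.Str.isIn (PySem.Str.lower token) p.2) = []
    · -- every pool element matched this token: the loop stops with everything collected
      have hall : ∀ p ∈ remaining, PySem.Str.isIn (PySem.Str.lower token) p.2 := by
        intro p hp
        have := List.filter_eq_nil_iff.1 hrem p hp
        simpa using this
      rw [List.nil_append, if_pos hrem]
      simp only [List.mem_append, List.mem_map, List.mem_filter]
      constructor
      · rintro (hx | ⟨p, ⟨hp, hin⟩, rfl⟩)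
        · exact Or.inl hx
        · exact Or.inr ⟨p, hp, rfl, token, List.mem_cons_self .., hin⟩
      · rintro (hx | ⟨p, hp, rfl, _, _, _⟩)
        · exact Or.inl hx
        · exact Or.inr ⟨p, ⟨hp, hall p hp⟩, rfl⟩
    · rw [if_neg (by simpa using hrem), ih]
      simp only [List.nil_append, List.mem_append, List.mem_map, List.mem_filter]
      constructor
      · rintro ((hx | ⟨p, ⟨hp, hin⟩, rfl⟩) | ⟨p, ⟨hp, hnin⟩, rfl, t, ht, hin⟩)
        · exact Or.inl hx
        · exact Or.inr ⟨p, hp, rfl, token, List.mem_cons_self .., hin⟩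
        · exact Or.inr ⟨p, hp, rfl, t, List.mem_cons_of_mem _ ht, hin⟩
      · rintro (hx | ⟨p, hp, rfl, t, ht, hin⟩)
        · exact Or.inl (Or.inl hx)
        · by_cases hm : PySem.Str.isIn (PySem.Str.lower token) p.2
          · exact Or.inl (Or.inr ⟨p, ⟨hp, hm⟩, rfl⟩)
          · rcases List.mem_cons.1 ht with rfl | ht'
            · exact absurd hin hm
            · exact Or.inr ⟨p, ⟨hp, by simpa using hm⟩, rfl, t, ht', hin⟩

-- the loop's hit list stays duplicate-free
theorem pv_nodup_altLoop (toks : List String) (hit : List Int)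
    (remaining : List (Int × String)) (h1 : hit.Nodup)
    (h2 : (remaining.map (fun p => p.1)).Nodup)
    (h3 : ∀ p ∈ remaining, p.1 ∉ hit) :
    (pvAltLoop toks hit remaining).Nodup := by
  induction toks generalizing hit remaining with
  | nil => exact h1
  | cons token ts ih =>
    rw [pvAltLoop]
    simp only [pv_fold_partition, List.nil_append]
    have hsubpos : ((remaining.filter (fun p => PySem.Str.isIn (PySem.Str.lower token) p.2)).map
        (fun p => p.1)).Sublist (remaining.map (fun p => p.1)) :=
      List.filter_sublist.map _
    have hhit' : (hit ++ (remaining.filter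
        (fun p => PySem.Str.isIn (PySem.Str.lower token) p.2)).map (fun p => p.1)).Nodup := by
      refine List.Nodup.append h1 (hsubpos.nodup h2) ?_
      intro a ha hb
      obtain ⟨p, hp, rfl⟩ := List.mem_map.1 hb
      exact h3 p (List.mem_of_mem_filter hp) ha
    split
    · exact hhit'
    · refine ih _ _ hhit' ((List.filter_sublist.map _).nodup h2) ?_
      intro p hp hmem
      have hpr := List.mem_of_mem_filter hp
      have hpneg : ¬ PySem.Str.isIn (PySem.Str.lower token) p.2 := by
        have := List.of_mem_filter hp
        simpa using this
      rcases List.mem_append.1 hmem with hA | hB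
      · exact h3 p hpr hA
      · obtain ⟨q, hq, hqe⟩ := List.mem_map.1 hB
        have : q = p := List.inj_on_of_nodup_map h2 (List.mem_of_mem_filter hq) hpr hqe
        subst this
        exact hpneg (by simpa using List.of_mem_filter hq)

-- ===== VERDICT (by name: the statement is the Claim_ definition above) =====
theorem select_feature_indices_py_spec : Claim_equal_select_feature_indices_py := by
  intro feature_names tokens _
  show select_feature_indices_py feature_names tokens = select_feature_indices_py_alt feature_names tokens
  unfold select_feature_indices_py select_feature_indices_py_alt
  dsimp only
  rw [PySem.List.foldl_append_if]
  rw [List.nil_append]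
  set ys := ((PySem.List.enumerate feature_names).filter
      (fun p => (tokens.map PySem.Str.lower).any
        (fun token => PySem.Str.isIn token (PySem.Str.lower p.2)))).map (fun p => p.1) with hys
  have hpw : ys.Pairwise (fun a b => a < b) := by
    rw [hys, List.pairwise_map]
    exact (PySem.List.pairwise_lt_enumerate feature_names 0).filter _
  refine (PySem.List.sorted_eq_of_perm_of_pairwise_lt _ _ _ ?_ ?_).symm
  · refine (List.perm_ext_iff_of_nodup ?_ ?_).2 ?_
    · exact List.Pairwise.imp (fun h => ne_of_lt h) hpw
    · refine pv_nodup_altLoop _ _ _ List.nodup_nil ?_ (by simp)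
      have : ((PySem.List.enumerate feature_names).map
            (fun p => (p.1, PySem.Str.lower p.2))).map (fun p => p.1) =
          (PySem.List.enumerate feature_names).map (fun p => p.1) := by
        simp
      rw [this]
      exact ((PySem.List.pairwise_lt_enumerate feature_names 0).imp
        (fun h => ne_of_lt h)).map _ (fun h => by simpa using h)
    · intro x
      rw [pv_mem_altLoop]
      simp only [List.not_mem_nil, false_or, hys, List.mem_map, List.mem_filter,
        List.any_eq_true]
      aesop
  · exact hpw
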